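-- pv_equiv track=rewrite | github.com/Waterloo-McConkey-Lab/Kastor | castor.py | get_most_common_nt
-- ===== SOURCE A (Python) =====
-- from collections import Counter
--
-- def get_most_common_nt(lst, ref_nt="-", next_nt="-"):
--     """Determines the best common nucleotide for correction.
--
--     Nucleotides are ranked based on both frequency and matching to flanking
--     nucleotides. Ranking is mostly if there are multiple possibilities. A
--     rank of 0 is the best with it being closest to the reference nucleotide
--     while a rank of 3 indicates the nucleotide is "random". One issue is
--     that there is no tiebreaker. Most common nucleotide is chosen by random
--     during ties.
--
--     Parameters
--     ----------
--     lst : list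
--         A list of all nucleotides suggested as a possible correction
--     ref_nt : char
--         The reference nucleotide at the position
--     next_nt : char
--         The downstream reference nucleotide
--
--     Returns
--     -------
--     char
--         the most common nucleotide in the list
--
--     """
--     if len(lst) < 1:
--         return 0
--
--     # list the most common element based on frequency
--     poss_nt = Counter(lst).most_common()
--     max_nt = 0
--     best_rank = 99
--
--     # determine best by comparing rank of the most frequent nucleotides
--     if ref_nt == "-":
--         return poss_nt[0][0]
--     else:
--         best_nt = ""
--         for nt in Counter(lst).most_common():
--             # set max count
--             if nt[1] < max_nt:
--                 break
--             else:
--                 max_nt = nt[1]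
--
--             # multiple max
--             if nt[0][0] == ref_nt:
--                 if nt[0][-1] == ref_nt and 0 < best_rank:
--                     best_nt = nt[0]
--                     best_rank = 0
--                 elif nt[0][-1] == next_nt and 1 < best_rank:
--                     best_nt = nt[0]
--                     best_rank = 1
--                 else:
--                     if 2 < best_rank:
--                         best_nt = nt[0]
--                         best_rank = 2
--             elif nt[0][-1] == next_nt and 2 < best_rank:
--                 # only match to next
--                 best_nt = nt[0]
--                 best_rank = 2
--             elif 3 < best_rank:
--                 # everything else
--                 best_nt = nt[0]
--                 best_rank = 3
--             else:
--                 pass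
--
--         return best_nt
-- ===== SOURCE B (Python) =====
-- from collections import Counter
--
-- def get_most_common_nt(lst, ref_nt="-", next_nt="-"):
--     counts = Counter(lst)
--     max_count = max(counts.values())
--     if ref_nt == "-":
--         for nt, c in counts.items():
--             if c == max_count:
--                 return nt
--     winner = None
--     best = 4
--     for nt, c in counts.items():
--         if c != max_count:
--             continue
--         if nt[0] == ref_nt:
--             r = 0 if nt[-1] == ref_nt else (1 if nt[-1] == next_nt else 2)
--         else:
--             r = 2 if nt[-1] == next_nt else 3
--         if r < best:
--             winner, best = nt, r
--     return winner
-- ===== Notes on version B (the rewrite author's own statement) =====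
-- stated objective: simpler
-- what changed: B never sorts: instead of Counter.most_common plus A's fused break-on-count-drop loop with a best_rank register, it takes max(counts.values()) and scans the counter dict directly, returning the first max-count key when ref_nt is '-' and otherwise a running arg-min of a flanking-match rank over the max-count keys.
-- outside the precondition, e.g. on get_most_common_nt([], 'A', 'C'): A returns 0, B raises ValueError; on get_most_common_nt([], '-', '-'): A returns 0, B raises ValueError; on get_most_common_nt(['', 'A'], 'A', 'C'): A raises IndexError, B raises IndexError
import Mathlib
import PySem

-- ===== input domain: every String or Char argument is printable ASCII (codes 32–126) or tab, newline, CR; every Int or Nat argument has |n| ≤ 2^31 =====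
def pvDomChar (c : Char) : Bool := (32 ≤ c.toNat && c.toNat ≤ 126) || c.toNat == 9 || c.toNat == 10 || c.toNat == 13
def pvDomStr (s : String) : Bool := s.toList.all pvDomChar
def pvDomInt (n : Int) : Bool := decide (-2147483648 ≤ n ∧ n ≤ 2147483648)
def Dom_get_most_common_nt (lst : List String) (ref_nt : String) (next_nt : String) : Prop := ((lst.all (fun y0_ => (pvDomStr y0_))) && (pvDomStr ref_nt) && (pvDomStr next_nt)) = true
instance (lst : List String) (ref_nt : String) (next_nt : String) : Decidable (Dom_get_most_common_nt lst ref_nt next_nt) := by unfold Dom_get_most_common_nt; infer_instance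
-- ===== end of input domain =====

-- B drops A's sort-based most_common pipeline entirely: it takes max(counts.values()) and scans the counter
-- dict directly (first max-count element for ref_nt == "-", else a running arg-min of a flank-match rank over
-- the max-count elements), with no sorting and no break-on-count-drop loop (objective: simpler).
-- On the empty list A returns the int 0 (not a string) and Python B raises ValueError; excluded by Pre_.


-- ===== PORT A =====
-- Counter(lst).most_common(): counts in descending order, stable (insertion order of first occurrence)
def pvMostCommon (lst : List String) : List (String × Int) :=
  PySem.List.sorted ((PySem.Dict.counter lst).items) (fun kv => kv.2) true

-- nt[i] as a 1-character Python string; Pre_ guarantees the index is in range where either program evaluates it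
def pvCharStr (s : String) (i : Int) : String :=
  ((PySem.Str.pyGet? s i).map (fun c => String.ofList [c])).getD ""

-- A's for-loop over most_common: state (max_nt, best_rank, best_nt), break when count drops
def pvALoop (ref_nt next_nt : String) : List (String × Int) → Int → Int → String → String
  | [], _, _, best_nt => best_nt
  | nt :: rest, max_nt, best_rank, best_nt =>
    if nt.2 < max_nt then best_nt
    else
      let max_nt := nt.2
      if pvCharStr nt.1 0 == ref_nt then
        if pvCharStr nt.1 (-1) == ref_nt && decide (0 < best_rank) then
          pvALoop ref_nt next_nt rest max_nt 0 nt.1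
        else if pvCharStr nt.1 (-1) == next_nt && decide (1 < best_rank) then
          pvALoop ref_nt next_nt rest max_nt 1 nt.1
        else if 2 < best_rank then
          pvALoop ref_nt next_nt rest max_nt 2 nt.1
        else
          pvALoop ref_nt next_nt rest max_nt best_rank best_nt
      else if pvCharStr nt.1 (-1) == next_nt && decide (2 < best_rank) then
        pvALoop ref_nt next_nt rest max_nt 2 nt.1
      else if 3 < best_rank then
        pvALoop ref_nt next_nt rest max_nt 3 nt.1
      else
        pvALoop ref_nt next_nt rest max_nt best_rank best_nt

def get_most_common_nt (lst : List String) (ref_nt : String) (next_nt : String) : String :=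
  if lst.length < 1 then ""   -- Python A returns the int 0 here (not a string); excluded by Pre_
  else
    let poss_nt := pvMostCommon lst
    if ref_nt == "-" then ((PySem.List.pyGet? poss_nt 0).map Prod.fst).getD ""  -- poss_nt nonempty under Pre_
    else pvALoop ref_nt next_nt (pvMostCommon lst) 0 99 ""

-- ===== PORT B =====
-- B's inline rank expression: 0 both flanks match ref, 1 ref then next, 2 one-side match, 3 otherwise
def pvRank (ref_nt next_nt nt : String) : Int :=
  if pvCharStr nt 0 == ref_nt then
    if pvCharStr nt (-1) == ref_nt then 0
    else if pvCharStr nt (-1) == next_nt then 1 else 2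
  else if pvCharStr nt (-1) == next_nt then 2 else 3

-- one iteration of B's winner loop: skip counts below the max, keep the first minimal rank
def pvBStep (ref_nt next_nt : String) (m : Int) (st : Option String × Int) (kv : String × Int) : Option String × Int :=
  if kv.2 != m then st
  else
    let r := pvRank ref_nt next_nt kv.1
    if r < st.2 then (some kv.1, r) else st

def get_most_common_nt_alt (lst : List String) (ref_nt : String) (next_nt : String) : String :=
  let counts := PySem.Dict.counter lst
  match PySem.List.max? counts.values (fun x => x) with
  | none => ""   -- Python max([]) raises ValueError here (empty lst); excluded by Pre_
  | some m =>
    if ref_nt == "-" then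
      match counts.items.find? (fun kv => kv.2 == m) with
      | some kv => kv.1
      | none =>   -- unreachable (m is a value of counts); Python would fall through to the winner loop
        ((counts.items.foldl (pvBStep ref_nt next_nt m) (none, 4)).1).getD ""
    else
      ((counts.items.foldl (pvBStep ref_nt next_nt m) (none, 4)).1).getD ""

-- ===== PRECONDITION & SPEC =====
-- Pre_ excludes the empty list, on which A returns the int 0 (not a string of the declared return type),
-- and lists whose empty string "" reaches the maximal count when ref_nt != "-", on which A raises IndexError ""[0].
def Pre_get_most_common_nt (lst : List String) (ref_nt : String) (next_nt : String) : Prop :=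
  lst ≠ [] ∧ (ref_nt ≠ "-" → "" ∈ lst → ∃ s ∈ lst, lst.count "" < lst.count s)
instance (lst : List String) (ref_nt : String) (next_nt : String) : Decidable (Pre_get_most_common_nt lst ref_nt next_nt) := by unfold Pre_get_most_common_nt; infer_instance

def pvWitness_get_most_common_nt : List String × String × String := (["AC", "A", "AC"], "A", "C")

def Spec_get_most_common_nt (lst : List String) (ref_nt : String) (next_nt : String) (out : String) : Prop := out = get_most_common_nt_alt lst ref_nt next_nt
instance (lst : List String) (ref_nt : String) (next_nt : String) (out : String) : Decidable (Spec_get_most_common_nt lst ref_nt next_nt out) := by unfold Spec_get_most_common_nt; infer_instance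

-- ===== CLAIM (what is proved, stated in full; the proofs are below) =====
def Claim_equal_get_most_common_nt : Prop := ∀ (lst : List String) (ref_nt : String) (next_nt : String), Dom_get_most_common_nt lst ref_nt next_nt → Pre_get_most_common_nt lst ref_nt next_nt → Spec_get_most_common_nt lst ref_nt next_nt (get_most_common_nt lst ref_nt next_nt)

-- ===== LEMMAS AND PROOFS =====

-- the fold step of a first-minimal-rank selection over plain strings (proof-side normal form of both loops)
def pvStep (ref_nt next_nt : String) (acc : Option String) (x : String) : Option String :=
  match acc with
  | none => some x
  | some m => if pvRank ref_nt next_nt x < pvRank ref_nt next_nt m then some x else some m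

theorem pvRank_le3 (ref_nt next_nt s : String) : pvRank ref_nt next_nt s ≤ 3 := by
  unfold pvRank; split_ifs <;> omega

-- one step of A's loop is exactly "update iff rank < best_rank"
theorem pvALoop_step (ref_nt next_nt s : String) (cnt m br : Int) (t : List (String × Int)) (best : String) :
    pvALoop ref_nt next_nt ((s, cnt) :: t) m br best =
      if cnt < m then best
      else if pvRank ref_nt next_nt s < br then pvALoop ref_nt next_nt t cnt (pvRank ref_nt next_nt s) s
      else pvALoop ref_nt next_nt t cnt br best := by
  by_cases h1 : (pvCharStr s 0 == ref_nt) = true <;>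
  by_cases h2 : (pvCharStr s (-1) == ref_nt) = true <;>
  by_cases h3 : (pvCharStr s (-1) == next_nt) = true <;>
  by_cases hb : cnt < m <;>
    simp only [pvALoop, pvRank, h1, h2, h3, hb, Bool.true_and, Bool.false_and,
      if_true, if_false, Bool.false_eq_true, decide_eq_true_eq] <;>
    split_ifs <;> first | rfl | omega

-- A's loop over the tied leading group equals the pvStep-fold over that group
theorem pvALoop_eq_fold (ref_nt next_nt : String) :
    ∀ (t : List (String × Int)) (c : Int) (best : String),
      t.Pairwise (fun a b => b.2 ≤ a.2) → (∀ kv ∈ t, kv.2 ≤ c) →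
      pvALoop ref_nt next_nt t c (pvRank ref_nt next_nt best) best =
        (List.foldl (pvStep ref_nt next_nt) (some best)
          ((t.filter (fun kv => kv.2 == c)).map Prod.fst)).getD "" := by
  intro t
  induction t with
  | nil => intro c best _ _; simp [pvALoop]
  | cons kv rest ih =>
    intro c best hp hle
    obtain ⟨s, cnt⟩ := kv
    have hcnt : cnt ≤ c := hle (s, cnt) (List.mem_cons_self ..)
    have hrest_le_cnt : ∀ kv ∈ rest, kv.2 ≤ cnt := by
      intro kv hkv; exact (List.pairwise_cons.mp hp).1 kv hkv
    rw [pvALoop_step]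
    by_cases hlt : cnt < c
    · have hfil : rest.filter (fun kv => kv.2 == c) = [] := by
        apply List.filter_eq_nil_iff.mpr
        intro kv hkv
        have := hrest_le_cnt kv hkv
        simp only [beq_iff_eq]; omega
      have hbne : ((cnt == c) : Bool) = false := beq_eq_false_iff_ne.mpr (by omega)
      simp [hlt, hbne, hfil]
    · have hc : cnt = c := le_antisymm hcnt (by omega)
      subst hc
      have hp' : rest.Pairwise (fun a b => b.2 ≤ a.2) := (List.pairwise_cons.mp hp).2
      simp only [hlt, if_false, List.filter_cons, beq_self_eq_true, if_true, List.map_cons]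
      by_cases hr : pvRank ref_nt next_nt s < pvRank ref_nt next_nt best
      · simp only [hr, if_true, List.foldl_cons]
        rw [ih cnt s hp' hrest_le_cnt]
        simp [pvStep, hr]
      · simp only [hr, if_false, List.foldl_cons]
        rw [ih cnt best hp' hrest_le_cnt]
        simp [pvStep, hr]

-- most_common of a nonempty list is nonempty
theorem pvMostCommon_ne_nil (lst : List String) (h : lst ≠ []) : pvMostCommon lst ≠ [] := by
  unfold pvMostCommon
  rw [Ne, PySem.List.sorted_eq_nil_iff, PySem.Dict.items_counter]
  obtain ⟨x, xs, rfl⟩ := List.exists_cons_of_ne_nil h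
  intro hmap
  have : x ∈ PySem.Set.ofList (x :: xs) := (PySem.Set.mem_ofList _ _).mpr (by simp)
  rw [List.map_eq_nil_iff.mp hmap] at this
  simp at this

-- every count in most_common is nonnegative
theorem pvMostCommon_nonneg (lst : List String) (kv : String × Int) (h : kv ∈ pvMostCommon lst) :
    0 ≤ kv.2 := by
  unfold pvMostCommon at h
  rw [PySem.List.mem_sorted, PySem.Dict.items_counter] at h
  obtain ⟨k, _, rfl⟩ := List.mem_map.mp h
  positivity

-- inserting (by descending count) into a descending list with all counts ≤ M keeps the max-count sublist's order
theorem pvFilter_insertBy (M : Int) (x : String × Int) :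
    ∀ (ys : List (String × Int)), ys.Pairwise (fun a b => b.2 ≤ a.2) → (∀ y ∈ ys, y.2 ≤ M) → x.2 ≤ M →
      (PySem.List.insertBy (fun a b => decide (b.2 < a.2)) x ys).filter (fun kv => kv.2 == M) =
        ys.filter (fun kv => kv.2 == M) ++ [x].filter (fun kv => kv.2 == M) := by
  intro ys
  induction ys with
  | nil => intro _ _ _; simp [PySem.List.insertBy]
  | cons y ys ih =>
    intro hp hle hx
    have hyM : y.2 ≤ M := hle y (List.mem_cons_self ..)
    have htail : ∀ z ∈ ys, z.2 ≤ y.2 := (List.pairwise_cons.mp hp).1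
    by_cases hb : (decide (y.2 < x.2) : Bool) = true
    · have hylt : y.2 < x.2 := of_decide_eq_true hb
      simp only [PySem.List.insertBy, hb, if_true]
      by_cases hpx : ((x.2 == M) : Bool) = true
      · have hxM : x.2 = M := beq_iff_eq.mp hpx
        have hyne : ((y.2 == M) : Bool) = false := beq_eq_false_iff_ne.mpr (by omega)
        have hfil : ys.filter (fun kv => kv.2 == M) = [] := by
          apply List.filter_eq_nil_iff.mpr
          intro z hz
          have := htail z hz
          simp only [beq_iff_eq]; omega
        simp [hpx, hyne, hfil]
      · simp [List.filter_cons, hpx]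
    · have hins : PySem.List.insertBy (fun a b => decide (b.2 < a.2)) x (y :: ys) =
          y :: PySem.List.insertBy (fun a b => decide (b.2 < a.2)) x ys := by
        simp [PySem.List.insertBy, hb]
      rw [hins, List.filter_cons, List.filter_cons,
        ih (List.pairwise_cons.mp hp).2 (fun z hz => hle z (List.mem_cons_of_mem y hz)) hx]
      by_cases hpy : ((y.2 == M) : Bool) = true <;> simp [hpy]

-- stability of the descending sort at the maximal count: filtering the max-count elements commutes with sorting
theorem pvFilter_sorted_rev (M : Int) :
    ∀ (l : List (String × Int)), (∀ kv ∈ l, kv.2 ≤ M) →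
      (PySem.List.sorted l (fun kv => kv.2) true).filter (fun kv => kv.2 == M) =
        l.filter (fun kv => kv.2 == M) := by
  intro l
  induction l using List.reverseRecOn with
  | nil => intro _; simp [PySem.List.sorted]
  | append_singleton l x ih =>
    intro hle
    have hsorted : PySem.List.sorted (l ++ [x]) (fun kv => kv.2) true =
        PySem.List.insertBy (fun a b => decide (b.2 < a.2)) x (PySem.List.sorted l (fun kv => kv.2) true) := by
      rw [PySem.List.sorted_rev_eq_foldl_insertBy, PySem.List.sorted_rev_eq_foldl_insertBy, List.foldl_append]
      simp
    rw [hsorted,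
      pvFilter_insertBy M x _ (PySem.List.sorted_pairwise_rev l (fun kv => kv.2))
        (fun y hy => hle y (List.mem_append_left _ ((PySem.List.mem_sorted ..).mp hy)))
        (hle x (List.mem_append_right _ (List.mem_cons_self ..))),
      ih (fun y hy => hle y (List.mem_append_left _ hy)), List.filter_append]

-- find? returns the head of the filtered list (no such lemma found in Mathlib/PySem by search)
theorem pvFind?_eq_head?_filter {α : Type} (p : α → Bool) :
    ∀ (l : List α), l.find? p = (l.filter p).head? := by
  intro l
  induction l with
  | nil => rfl
  | cons x l ih =>
    cases h : p x
    · simp only [List.find?, List.filter, h]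
      exact ih
    · simp [List.find?, List.filter, h]

-- B's winner loop skips every element whose count is not the max
theorem pvBfold_filter (ref_nt next_nt : String) (M : Int) :
    ∀ (l : List (String × Int)) (st : Option String × Int),
      l.foldl (pvBStep ref_nt next_nt M) st =
        (l.filter (fun kv => kv.2 == M)).foldl (pvBStep ref_nt next_nt M) st := by
  intro l
  induction l with
  | nil => intro st; rfl
  | cons kv l ih =>
    intro st
    by_cases h : ((kv.2 == M) : Bool) = true
    · simp [h, List.foldl_cons, ih]
    · have hskip : pvBStep ref_nt next_nt M st kv = st := by
        simp only [pvBStep, bne, h, Bool.not_false, if_true]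
      simp [h, List.foldl_cons, hskip, ih]

-- over max-count elements, B's (winner, best) pair tracks exactly the pvStep fold
theorem pvBfold_eq_fold (ref_nt next_nt : String) (M : Int) :
    ∀ (G : List (String × Int)) (w : String),
      (∀ kv ∈ G, kv.2 = M) →
      (G.foldl (pvBStep ref_nt next_nt M) (some w, pvRank ref_nt next_nt w)).1 =
        (G.map Prod.fst).foldl (pvStep ref_nt next_nt) (some w) := by
  intro G
  induction G with
  | nil => intro w _; rfl
  | cons kv G ih =>
    intro w hG
    have hkv : (kv.2 != M) = false := by simp [hG kv (List.mem_cons_self ..)]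
    have hG' : ∀ z ∈ G, z.2 = M := fun z hz => hG z (List.mem_cons_of_mem kv hz)
    simp only [List.foldl_cons, List.map_cons, pvBStep, hkv, Bool.false_eq_true, if_false, pvStep]
    by_cases hr : pvRank ref_nt next_nt kv.1 < pvRank ref_nt next_nt w
    · simp only [hr, if_true]
      exact ih kv.1 hG'
    · simp only [hr, if_false]
      exact ih w hG'

-- ===== VERDICT (by name: the statement is the Claim_ definition above) =====
theorem get_most_common_nt_spec : Claim_equal_get_most_common_nt := by
  intro lst ref_nt next_nt _ hpre
  unfold Spec_get_most_common_nt get_most_common_nt get_most_common_nt_alt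
  obtain ⟨hne, -⟩ := hpre
  have hlen : ¬ lst.length < 1 := by
    cases lst with | nil => exact absurd rfl hne | cons a t => simp
  rcases hmc : pvMostCommon lst with _ | ⟨⟨top, topc⟩, rest⟩
  · exact absurd hmc (pvMostCommon_ne_nil lst hne)
  · -- the max of counts.values is the head count of most_common
    have htop_mem : (top, topc) ∈ (PySem.Dict.counter lst).items := by
      have : (top, topc) ∈ pvMostCommon lst := by rw [hmc]; exact List.mem_cons_self ..
      exact (PySem.List.mem_sorted ..).mp this
    have hval_ne : (PySem.Dict.counter lst).values ≠ [] := by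
      intro h
      have : topc ∈ (PySem.Dict.counter lst).values := by
        simp only [PySem.Dict.values]
        exact List.mem_map.mpr ⟨(top, topc), htop_mem, rfl⟩
      rw [h] at this; simp at this
    obtain ⟨M, hM⟩ : ∃ M, PySem.List.max? (PySem.Dict.counter lst).values (fun x => x) = some M := by
      rcases h : PySem.List.max? (PySem.Dict.counter lst).values (fun x => x) with _ | M
      · exact absurd ((PySem.List.max?_eq_none_iff ..).mp h) hval_ne
      · exact ⟨M, rfl⟩
    have hMmax : ∀ y ∈ (PySem.Dict.counter lst).values, y ≤ M := PySem.List.max?_isMax hM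
    have htopc_max : ∀ kv ∈ (PySem.Dict.counter lst).items, kv.2 ≤ topc :=
      fun kv hkv => PySem.List.key_head_sorted_rev_ge ((PySem.Dict.counter lst).items) (fun kv => kv.2) hmc kv hkv
    have hMtopc : M = topc := by
      have h1 : topc ≤ M := hMmax topc (by
        simp only [PySem.Dict.values]
        exact List.mem_map.mpr ⟨(top, topc), htop_mem, rfl⟩)
      have h2 : M ≤ topc := by
        obtain ⟨y, hy, hyM⟩ := List.mem_map.mp (by
          simpa only [PySem.Dict.values] using PySem.List.max?_mem hM)
        calc M = y.2 := hyM.symm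
          _ ≤ topc := htopc_max y hy
      omega
    subst hMtopc
    -- the max-count elements of the counter, in insertion order = in most_common order
    have hstab : ((PySem.Dict.counter lst).items).filter (fun kv => kv.2 == M) =
        (pvMostCommon lst).filter (fun kv => kv.2 == M) :=
      (pvFilter_sorted_rev M ((PySem.Dict.counter lst).items) htopc_max).symm
    have hfilter_cons : (pvMostCommon lst).filter (fun kv => kv.2 == M) =
        (top, M) :: rest.filter (fun kv => kv.2 == M) := by
      rw [hmc, List.filter_cons]; simp
    simp only [hlen, if_false, hM]
    by_cases href : (ref_nt == "-") = true
    · -- first max-count element of the counter = head of most_common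
      have hfind : ((PySem.Dict.counter lst).items).find? (fun kv => kv.2 == M) = some (top, M) := by
        rw [pvFind?_eq_head?_filter, hstab, hfilter_cons]; rfl
      simp [href, hfind, PySem.List.pyGet?, PySem.List.pyIdx?]
    · simp only [href, if_false, Bool.false_eq_true]
      have hpair := PySem.List.sorted_pairwise_rev ((PySem.Dict.counter lst).items) (fun kv => kv.2)
      rw [show PySem.List.sorted ((PySem.Dict.counter lst).items) (fun kv => kv.2) true = pvMostCommon lst from rfl, hmc, List.pairwise_cons] at hpair
      have h0 : ¬ (M < 0) := by
        have := pvMostCommon_nonneg lst (top, M) (by rw [hmc]; simp)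
        simp at this; omega
      -- A's side: the fused loop is the pvStep fold over the tied leading group
      rw [pvALoop_step]
      have h99 : pvRank ref_nt next_nt top < 99 := by have := pvRank_le3 ref_nt next_nt top; omega
      simp only [h0, if_false, h99, if_true]
      rw [pvALoop_eq_fold ref_nt next_nt rest M top hpair.2 hpair.1]
      -- B's side: the winner loop is the same fold over the same group
      rw [pvBfold_filter, hstab, hfilter_cons, List.foldl_cons]
      have hstep1 : pvBStep ref_nt next_nt M (none, 4) (top, M) =
          (some top, pvRank ref_nt next_nt top) := by
        have h3 := pvRank_le3 ref_nt next_nt top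
        simp only [pvBStep, bne_self_eq_false, Bool.false_eq_true, if_false]
        rw [if_pos (by omega)]
      rw [hstep1, pvBfold_eq_fold ref_nt next_nt M _ top
        (fun kv hkv => beq_iff_eq.mp (List.mem_filter.mp hkv).2)]
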